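-- pv_equiv track=rewrite | github.com/iml130/sola | evaluation/minhton/analysis/routing_tables.py | getRoutingTableNumbers
-- ===== SOURCE A (Python) =====
-- def getRoutingTableNumbers(level: int, number: int, fanout: int):
--     """
--     calculating the valid numbers of the routing table neighbors and rt neighbor childs for one node
--     """
--
--     seq = [d*(fanout**i) for i in range((fanout-1)*level)
--            for d in range(1, fanout)]
--     nList_left = [number - k for k in seq if number - k >= 0]
--     nList_right = [number + k for k in seq if number + k < fanout**level]
--
--     neighbor_numbers = sorted(nList_left + nList_right)
--     neighbor_children_numbers = [
--         parent_number * fanout + k for parent_number in neighbor_numbers for k in range(0, fanout)]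
--
--     return neighbor_numbers, neighbor_children_numbers
-- ===== SOURCE B (Python) =====
-- def getRoutingTableNumbers(level: int, number: int, fanout: int):
--     """
--     Emits the sorted neighbor list directly, with no offset list, no sort and no
--     reverse: two opposite-direction scans over the (power, digit) pairs.  Offsets
--     d*fanout**i are strictly increasing in (i, d), so scanning (i, d) downward
--     yields the left neighbors number-k in ascending order, and scanning upward
--     yields the right neighbors number+k in ascending order; appending both scans
--     into one accumulator is already the sorted result.
--     """
--     if fanout < 2 or level < 1:
--         return [], []
--     top = (fanout - 1) * level
--     cap = fanout ** level
--     out = []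
--     for i in range(top - 1, -1, -1):      # left neighbors, farthest first
--         for d in range(fanout - 1, 0, -1):
--             v = number - d * fanout ** i
--             if v >= 0:
--                 out.append(v)
--     for i in range(top):                  # right neighbors, nearest first
--         for d in range(1, fanout):
--             v = number + d * fanout ** i
--             if v < cap:
--                 out.append(v)
--     children = []
--     for parent in out:
--         children.extend(range(parent * fanout, (parent + 1) * fanout))
--     return out, children
-- ===== Notes on version B (the rewrite author's own statement) =====
-- stated objective: alternative
-- what changed: B never materializes the offset list and never calls sorted(): it writes the sorted neighbor list directly into one accumulator by two opposite-direction scans of the (power, digit) grid - a downward scan (i,d descending) emits left neighbors in ascending order, then an upward scan emits right neighbors in ascending order - and extends children with contiguous ranges.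
import Mathlib
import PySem

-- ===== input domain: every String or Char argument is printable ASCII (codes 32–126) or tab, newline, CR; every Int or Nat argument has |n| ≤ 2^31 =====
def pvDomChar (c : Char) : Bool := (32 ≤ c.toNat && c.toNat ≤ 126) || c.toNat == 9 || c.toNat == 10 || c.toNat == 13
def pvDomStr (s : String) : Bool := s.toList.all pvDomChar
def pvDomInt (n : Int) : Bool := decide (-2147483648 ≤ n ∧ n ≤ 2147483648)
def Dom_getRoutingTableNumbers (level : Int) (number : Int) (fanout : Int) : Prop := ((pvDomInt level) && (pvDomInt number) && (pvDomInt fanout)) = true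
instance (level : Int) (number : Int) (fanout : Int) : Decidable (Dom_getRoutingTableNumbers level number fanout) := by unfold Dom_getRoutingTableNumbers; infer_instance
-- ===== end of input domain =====

-- B writes the sorted neighbor list directly by two opposite-direction scans of the
-- (power, digit) grid, with no offset list, no sorted() and no reverse; objective: alternative.

-- ===== PORT A =====
-- fanout**i: i ranges over range(0, (fanout-1)*level) so 0 ≤ i and i.toNat is exact.
-- fanout**level: the predicate is only ever evaluated on elements of seq, which is nonempty
-- only when fanout ≥ 2 and level ≥ 1, where level.toNat is exact (Python's value is an int there).
def getRoutingTableNumbers (level : Int) (number : Int) (fanout : Int) : List Int × List Int :=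
  let seq := (PySem.List.pyRange 0 ((fanout - 1) * level) 1).flatMap
      (fun i => (PySem.List.pyRange 1 fanout 1).map (fun d => d * fanout ^ i.toNat))
  let nListLeft := (seq.filter (fun k => decide (0 ≤ number - k))).map (fun k => number - k)
  let nListRight := (seq.filter (fun k => decide (number + k < fanout ^ level.toNat))).map
      (fun k => number + k)
  let neighborNumbers := PySem.List.sorted (nListLeft ++ nListRight) (fun x => x) false
  let neighborChildren := neighborNumbers.flatMap
      (fun p => (PySem.List.pyRange 0 fanout 1).map (fun k => p * fanout + k))
  (neighborNumbers, neighborChildren)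

-- ===== PORT B =====
def getRoutingTableNumbers_alt (level : Int) (number : Int) (fanout : Int) : List Int × List Int :=
  if fanout < 2 ∨ level < 1 then ([], [])
  else
    let top := (fanout - 1) * level
    let cap := fanout ^ level.toNat
    -- left neighbors, farthest first: for i in range(top-1, -1, -1): for d in range(fanout-1, 0, -1)
    let out1 := (PySem.List.pyRange (top - 1) (-1) (-1)).foldl (fun acc i =>
        (PySem.List.pyRange (fanout - 1) 0 (-1)).foldl (fun acc d =>
          if 0 ≤ number - d * fanout ^ i.toNat
          then acc ++ [number - d * fanout ^ i.toNat] else acc) acc) []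
    -- right neighbors, nearest first: for i in range(top): for d in range(1, fanout)
    let out := (PySem.List.pyRange 0 top 1).foldl (fun acc i =>
        (PySem.List.pyRange 1 fanout 1).foldl (fun acc d =>
          if number + d * fanout ^ i.toNat < cap
          then acc ++ [number + d * fanout ^ i.toNat] else acc) acc) out1
    let children := out.foldl (fun acc parent =>
        acc ++ PySem.List.pyRange (parent * fanout) ((parent + 1) * fanout) 1) []
    (out, children)

-- ===== PRECONDITION & SPEC =====
def Spec_getRoutingTableNumbers (level : Int) (number : Int) (fanout : Int) (out : List Int × List Int) : Prop := out = getRoutingTableNumbers_alt level number fanout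
instance (level : Int) (number : Int) (fanout : Int) (out : List Int × List Int) : Decidable (Spec_getRoutingTableNumbers level number fanout out) := by unfold Spec_getRoutingTableNumbers; infer_instance

-- ===== CLAIM (what is proved, stated in full; the proofs are below) =====
def Claim_equal_getRoutingTableNumbers : Prop := ∀ (level : Int) (number : Int) (fanout : Int), Dom_getRoutingTableNumbers level number fanout → Spec_getRoutingTableNumbers level number fanout (getRoutingTableNumbers level number fanout)

-- ===== LEMMAS AND PROOFS =====

-- the offset sequence, one pass per power of fanout (proof-only characterization)
def pvS (fanout : Int) : Nat → Int → List Int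
  | 0, _ => []
  | n + 1, p => (PySem.List.pyRange 1 fanout 1).map (fun d => d * p) ++ pvS fanout n (p * fanout)

theorem pvSeq_eq_pvS (fanout : Int) (n : Nat) : ∀ i : Int, 0 ≤ i →
    (PySem.List.pyRange i (i + n) 1).flatMap
      (fun j => (PySem.List.pyRange 1 fanout 1).map (fun d => d * fanout ^ j.toNat))
    = pvS fanout n (fanout ^ i.toNat) := by
  induction n with
  | zero => intro i hi; simp [PySem.List.pyRange_one_eq_nil, pvS]
  | succ n ih =>
    intro i hi
    rw [PySem.List.pyRange_one_cons (by omega : i < i + (n + 1 : Nat))]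
    simp only [List.flatMap_cons, pvS]
    have h2 : fanout ^ (i + 1).toNat = fanout ^ i.toNat * fanout := by
      have : (i + 1).toNat = i.toNat + 1 := by omega
      rw [this, pow_succ]
    rw [show i + ((n + 1 : Nat) : Int) = (i + 1) + n by push_cast; ring,
        ih (i + 1) (by omega), h2]

theorem pvS_lower_bound (fanout : Int) (hf : 2 ≤ fanout) (n : Nat) :
    ∀ p : Int, 1 ≤ p → ∀ x ∈ pvS fanout n p, p ≤ x := by
  induction n with
  | zero => intro p hp x hx; simp [pvS] at hx
  | succ n ih =>
    intro p hp x hx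
    simp only [pvS, List.mem_append, List.mem_map] at hx
    rcases hx with ⟨d, hd, rfl⟩ | hx
    · rw [PySem.List.mem_pyRange_one] at hd
      nlinarith [hd.1, hd.2]
    · have := ih (p * fanout) (by nlinarith) x hx
      nlinarith

theorem pvS_pairwise (fanout : Int) (hf : 2 ≤ fanout) (n : Nat) :
    ∀ p : Int, 1 ≤ p → (pvS fanout n p).Pairwise (· < ·) := by
  induction n with
  | zero => intro p hp; simp [pvS]
  | succ n ih =>
    intro p hp
    rw [pvS, List.pairwise_append]
    refine ⟨?_, ih (p * fanout) (by nlinarith), ?_⟩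
    · rw [List.pairwise_map]
      exact List.Pairwise.imp (fun {a b} hab => by nlinarith)
        (PySem.List.pairwise_lt_pyRange_one 1 fanout)
    · intro x hx y hy
      simp only [List.mem_map] at hx
      rcases hx with ⟨d, hd, rfl⟩
      rw [PySem.List.mem_pyRange_one] at hd
      have hy' := pvS_lower_bound fanout hf n (p * fanout) (by nlinarith) y hy
      nlinarith [hd.1, hd.2]

-- B's nested append-if double loop, flattened: it collects (filter p).map f of the flattened grid
theorem pv_nested_append_if (outer : List Int) (g : Int → List Int) (p : Int → Bool)
    (f : Int → Int) (acc : List Int) :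
    outer.foldl (fun acc i => (g i).foldl
        (fun acc k => if p k then acc ++ [f k] else acc) acc) acc
    = acc ++ ((outer.flatMap g).filter p).map f := by
  induction outer generalizing acc with
  | nil => simp
  | cons i outer ih =>
    simp only [List.foldl_cons, List.flatMap_cons, List.filter_append, List.map_append]
    rw [PySem.List.foldl_append_if, ih, List.append_assoc]

-- the descending double scan runs over exactly the reversed offset sequence
theorem pv_desc_grid (N fanout : Int) :
    (PySem.List.pyRange (N - 1) (-1) (-1)).flatMap
      (fun i => (PySem.List.pyRange (fanout - 1) 0 (-1)).map (fun d => d * fanout ^ i.toNat))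
    = ((PySem.List.pyRange 0 N 1).flatMap
        (fun i => (PySem.List.pyRange 1 fanout 1).map (fun d => d * fanout ^ i.toNat))).reverse := by
  have h1 : PySem.List.pyRange (N - 1) (-1) (-1) = (PySem.List.pyRange 0 N 1).reverse := by
    rw [PySem.List.pyRange_neg_one_eq_reverse]; norm_num
  have h2 : PySem.List.pyRange (fanout - 1) 0 (-1) = (PySem.List.pyRange 1 fanout 1).reverse := by
    rw [PySem.List.pyRange_neg_one_eq_reverse]; norm_num
  rw [h1, List.reverse_flatMap]
  simp [h2, List.map_reverse, Function.comp_def]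

theorem pv_main (level number fanout : Int) (hf : 2 ≤ fanout) (hl : 1 ≤ level) :
    getRoutingTableNumbers level number fanout = getRoutingTableNumbers_alt level number fanout := by
  unfold getRoutingTableNumbers getRoutingTableNumbers_alt
  rw [if_neg (by omega)]
  simp only []
  set N := (fanout - 1) * level with hNdef
  set seq := (PySem.List.pyRange 0 N 1).flatMap
      (fun i => (PySem.List.pyRange 1 fanout 1).map (fun d => d * fanout ^ i.toNat)) with hseqdef
  set L := (seq.filter (fun k => decide (0 ≤ number - k))).map (fun k => number - k) with hL
  set R := (seq.filter (fun k => decide (number + k < fanout ^ level.toNat))).map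
      (fun k => number + k) with hR
  -- B's first scan produces L.reverse
  have hout1 : (PySem.List.pyRange (N - 1) (-1) (-1)).foldl (fun acc i =>
        (PySem.List.pyRange (fanout - 1) 0 (-1)).foldl (fun acc d =>
          if 0 ≤ number - d * fanout ^ i.toNat
          then acc ++ [number - d * fanout ^ i.toNat] else acc) acc) ([] : List Int)
      = L.reverse := by
    have h := pv_nested_append_if (PySem.List.pyRange (N - 1) (-1) (-1))
      (fun i => (PySem.List.pyRange (fanout - 1) 0 (-1)).map (fun d => d * fanout ^ i.toNat))
      (fun k => decide (0 ≤ number - k)) (fun k => number - k) []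
    simp only [List.foldl_map, decide_eq_true_eq, List.nil_append] at h
    rw [h, pv_desc_grid N fanout, ← hseqdef, List.filter_reverse, List.map_reverse, ← hL]
  -- B's second scan appends R
  have hout : ∀ init : List Int, (PySem.List.pyRange 0 N 1).foldl (fun acc i =>
        (PySem.List.pyRange 1 fanout 1).foldl (fun acc d =>
          if number + d * fanout ^ i.toNat < fanout ^ level.toNat
          then acc ++ [number + d * fanout ^ i.toNat] else acc) acc) init = init ++ R := by
    intro init
    have h := pv_nested_append_if (PySem.List.pyRange 0 N 1)
      (fun i => (PySem.List.pyRange 1 fanout 1).map (fun d => d * fanout ^ i.toNat))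
      (fun k => decide (number + k < fanout ^ level.toNat)) (fun k => number + k) init
    simp only [List.foldl_map, decide_eq_true_eq] at h
    rw [h, ← hseqdef, ← hR]
  -- A's sorted result is L.reverse ++ R as well
  have hseqS : seq = pvS fanout N.toNat 1 := by
    have h0 : (0 : Int) + (N.toNat : Int) = N := by
      have : 0 ≤ N := by nlinarith
      omega
    have := pvSeq_eq_pvS fanout N.toNat 0 le_rfl
    rw [h0] at this
    simpa [hseqdef] using this
  have hsorted : PySem.List.sorted (L ++ R) (fun x => x) false = L.reverse ++ R := by
    apply PySem.List.sorted_eq_of_perm_of_pairwise_lt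
    · exact (List.reverse_perm L).append_right R
    · have hpw : seq.Pairwise (· < ·) := by
        rw [hseqS]; exact pvS_pairwise fanout hf N.toNat 1 le_rfl
      have hlb : ∀ x ∈ seq, 1 ≤ x := by
        rw [hseqS]; exact pvS_lower_bound fanout hf N.toNat 1 le_rfl
      rw [List.pairwise_append]
      refine ⟨?_, ?_, ?_⟩
      · rw [List.pairwise_reverse, hL, List.pairwise_map]
        exact List.Pairwise.imp (fun {a b} hab => by omega)
          (hpw.sublist List.filter_sublist)
      · rw [hR, List.pairwise_map]
        exact List.Pairwise.imp (fun {a b} hab => by omega)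
          (hpw.sublist List.filter_sublist)
      · intro x hx y hy
        rw [List.mem_reverse, hL, List.mem_map] at hx
        rw [hR, List.mem_map] at hy
        rcases hx with ⟨k1, hk1, rfl⟩
        rcases hy with ⟨k2, hk2, rfl⟩
        have h1 := hlb k1 (List.mem_of_mem_filter hk1)
        have h2 := hlb k2 (List.mem_of_mem_filter hk2)
        omega
  rw [hsorted, hout1, hout]
  refine Prod.ext rfl ?_
  simp only [PySem.List.foldl_append_eq_flatMap, List.nil_append]
  congr 1
  funext p
  rw [show (p + 1) * fanout = p * fanout + fanout by ring]
  simp [PySem.List.pyRange_one]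

theorem pv_empty (level number fanout : Int) (h : fanout < 2 ∨ level < 1) :
    getRoutingTableNumbers level number fanout = ([], []) := by
  unfold getRoutingTableNumbers
  have hseq : (PySem.List.pyRange 0 ((fanout - 1) * level) 1).flatMap
      (fun i => (PySem.List.pyRange 1 fanout 1).map (fun d => d * fanout ^ i.toNat)) = [] := by
    rcases h with h | h
    · have : PySem.List.pyRange 1 fanout 1 = [] :=
        PySem.List.pyRange_one_eq_nil (by omega)
      simp [this]
    · by_cases h2 : fanout < 2
      · have : PySem.List.pyRange 1 fanout 1 = [] :=
          PySem.List.pyRange_one_eq_nil (by omega)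
        simp [this]
      · have h2' : 2 ≤ fanout := by omega
        have : (fanout - 1) * level ≤ 0 := by nlinarith
        rw [PySem.List.pyRange_one_eq_nil this]
        simp
  simp [hseq, show PySem.List.sorted ([] : List Int) (fun x => x) false = [] from rfl]

-- ===== VERDICT (by name: the statement is the Claim_ definition above) =====
theorem getRoutingTableNumbers_spec : Claim_equal_getRoutingTableNumbers := by
  intro level number fanout _
  unfold Spec_getRoutingTableNumbers
  by_cases hf : fanout < 2
  · rw [pv_empty level number fanout (Or.inl hf)]
    unfold getRoutingTableNumbers_alt
    rw [if_pos (Or.inl hf)]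
  · by_cases hl : level < 1
    · rw [pv_empty level number fanout (Or.inr hl)]
      unfold getRoutingTableNumbers_alt
      rw [if_pos (Or.inr hl)]
    · exact pv_main level number fanout (by omega) (by omega)
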